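-- pv_equiv track=rewrite | github.com/grushaprasad/cosc426 | labs/lab04/Lab4.py | getUnigramFreqs
-- ===== SOURCE A (Python) =====
-- def getUnigramFreqs(preprocessed_text:list, vocab:set) -> dict:
--     frq = {}
--     for sent in preprocessed_text:
--         words = [ word if word in vocab else '[UNK]' for word in sent ]
--         for i in range(len(words)):
--             if (words[i] not in frq):
--                 frq[words[i]] = 1
--             else:
--                 frq[words[i]] += 1
--     return frq
-- ===== SOURCE B (Python) =====
-- def getUnigramFreqs(preprocessed_text: list, vocab: set) -> dict:
--     # Pass 1: raw frequency table over all words, no UNK substitution.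
--     raw = {}
--     for sent in preprocessed_text:
--         for word in sent:
--             raw[word] = raw.get(word, 0) + 1
--     # Pass 2: reshape — fold each out-of-vocabulary key's count into '[UNK]'.
--     frq = {}
--     for word, c in raw.items():
--         key = word if word in vocab else '[UNK]'
--         frq[key] = frq.get(key, 0) + c
--     return frq
-- ===== Notes on version B (the rewrite author's own statement) =====
-- stated objective: alternative
-- what changed: B first builds a raw frequency table over all words in one counting pass (no UNK substitution), then reshapes it in a second pass over the table items, folding each out-of-vocabulary key's count into '[UNK]' with get(...,0) accumulation; A maps each word to '[UNK]' on the fly and counts word by word.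
import Mathlib
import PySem

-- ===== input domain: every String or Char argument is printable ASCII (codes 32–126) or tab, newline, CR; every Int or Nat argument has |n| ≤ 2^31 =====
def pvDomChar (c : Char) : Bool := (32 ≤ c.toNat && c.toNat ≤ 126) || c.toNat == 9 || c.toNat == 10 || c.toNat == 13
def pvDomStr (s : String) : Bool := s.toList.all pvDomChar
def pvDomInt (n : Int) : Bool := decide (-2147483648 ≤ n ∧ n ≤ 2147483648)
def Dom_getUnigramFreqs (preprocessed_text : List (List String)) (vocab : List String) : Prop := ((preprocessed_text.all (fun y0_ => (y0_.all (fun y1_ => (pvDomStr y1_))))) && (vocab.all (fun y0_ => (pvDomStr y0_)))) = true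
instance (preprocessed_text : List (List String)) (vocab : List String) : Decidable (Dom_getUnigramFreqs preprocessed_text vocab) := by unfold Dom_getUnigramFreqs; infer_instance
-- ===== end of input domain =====

-- B builds a raw frequency table first and then folds OOV keys into '[UNK]' in a second pass,
-- instead of A's word-by-word map-then-count; alternative decomposition, same result.


-- ===== PORT A =====
def getUnigramFreqs (preprocessed_text : List (List String)) (vocab : List String) : List (String × Int) :=
  (preprocessed_text.foldl (fun frq sent =>
      let words := sent.map (fun word => if PySem.Set.contains vocab word then word else "[UNK]")
      (PySem.List.pyRange 0 (PySem.List.len words) 1).foldl (fun frq i =>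
        (fun frq wi =>
          if frq.contains wi = false then frq.insert wi (1 : Int)
          else frq.insert wi (frq.getD wi 0 + 1)) frq (PySem.List.pyGetD words i ""))
        frq)
    PySem.Dict.empty).items

-- ===== PORT B =====
def getUnigramFreqs_alt (preprocessed_text : List (List String)) (vocab : List String) : List (String × Int) :=
  let raw := preprocessed_text.foldl (fun raw sent =>
      sent.foldl (fun raw word => raw.insert word (raw.getD word 0 + 1)) raw)
    PySem.Dict.empty
  let frq := raw.items.foldl (fun frq p =>
      let key := if PySem.Set.contains vocab p.1 then p.1 else "[UNK]"
      frq.insert key (frq.getD key 0 + p.2))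
    PySem.Dict.empty
  frq.items

-- ===== PRECONDITION & SPEC =====
def Spec_getUnigramFreqs (preprocessed_text : List (List String)) (vocab : List String) (out : List (String × Int)) : Prop := out = getUnigramFreqs_alt preprocessed_text vocab
instance (preprocessed_text : List (List String)) (vocab : List String) (out : List (String × Int)) : Decidable (Spec_getUnigramFreqs preprocessed_text vocab out) := by unfold Spec_getUnigramFreqs; infer_instance

-- ===== CLAIM (what is proved, stated in full; the proofs are below) =====
def Claim_equal_getUnigramFreqs : Prop := ∀ (preprocessed_text : List (List String)) (vocab : List String), Dom_getUnigramFreqs preprocessed_text vocab → Spec_getUnigramFreqs preprocessed_text vocab (getUnigramFreqs preprocessed_text vocab)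

-- ===== LEMMAS AND PROOFS =====

def pvStep (d : PySem.Dict String Int) (w : String) : PySem.Dict String Int :=
  d.insert w (d.getD w 0 + 1)

theorem pvStep_branch (d : PySem.Dict String Int) (w : String) :
    (if d.contains w = false then d.insert w (1 : Int) else d.insert w (d.getD w 0 + 1)) = pvStep d w := by
  by_cases h : d.contains w = false
  · simp [h, pvStep, PySem.Dict.getD_of_not_contains]
  · simp [h, pvStep]

theorem foldl_branch_eq (words : List String) (d : PySem.Dict String Int) :
    words.foldl (fun frq wi =>
        if frq.contains wi = false then frq.insert wi (1 : Int)
        else frq.insert wi (frq.getD wi 0 + 1)) d = words.foldl pvStep d := by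
  simp only [pvStep_branch]

theorem inner_eq (words : List String) (d : PySem.Dict String Int) :
    (PySem.List.pyRange 0 (PySem.List.len words) 1).foldl (fun frq i =>
        (fun frq wi =>
          if frq.contains wi = false then frq.insert wi (1 : Int)
          else frq.insert wi (frq.getD wi 0 + 1)) frq (PySem.List.pyGetD words i ""))
        d = words.foldl pvStep d := by
  have h := PySem.List.foldl_pyRange_zero_pyGetD words ""
    (fun frq wi => if frq.contains wi = false then frq.insert wi (1 : Int)
      else frq.insert wi (frq.getD wi 0 + 1)) d
  exact h.trans (foldl_branch_eq words d)

theorem portA_fold_eq_counter (pt : List (List String)) (vocab : List String) :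
    ((pt.foldl (fun frq sent =>
      let words := sent.map (fun word => if PySem.Set.contains vocab word then word else "[UNK]")
      (PySem.List.pyRange 0 (PySem.List.len words) 1).foldl (fun frq i =>
        (fun frq wi =>
          if frq.contains wi = false then frq.insert wi (1 : Int)
          else frq.insert wi (frq.getD wi 0 + 1)) frq (PySem.List.pyGetD words i ""))
        frq)
    PySem.Dict.empty).items)
      = (PySem.Dict.counter ((pt.flatten).map
          (fun w => if PySem.Set.contains vocab w then w else "[UNK]"))).items := by
  have h1 : (fun (frq : PySem.Dict String Int) (sent : List String) =>
      let words := sent.map (fun word => if PySem.Set.contains vocab word then word else "[UNK]")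
      (PySem.List.pyRange 0 (PySem.List.len words) 1).foldl (fun frq i =>
        (fun frq wi =>
          if frq.contains wi = false then frq.insert wi (1 : Int)
          else frq.insert wi (frq.getD wi 0 + 1)) frq (PySem.List.pyGetD words i ""))
        frq)
      = (fun frq sent =>
          (sent.map (fun word => if PySem.Set.contains vocab word then word else "[UNK]")).foldl pvStep frq) := by
    funext frq sent
    exact inner_eq _ frq
  rw [h1]
  congr 1
  have h2 : List.foldl (fun (frq : PySem.Dict String Int) (l : List String) => l.foldl pvStep frq)
      PySem.Dict.empty (pt.map (List.map (fun word => if PySem.Set.contains vocab word then word else "[UNK]")))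
      = List.foldl (fun frq sent =>
          List.foldl pvStep frq (sent.map (fun word => if PySem.Set.contains vocab word then word else "[UNK]")))
        PySem.Dict.empty pt := List.foldl_map ..
  rw [← h2, ← List.foldl_flatten, ← List.map_flatten, ← PySem.Dict.foldl_insert_getD_add_one_eq_counter]
  rfl

theorem portB_raw (pt : List (List String)) :
    pt.foldl (fun raw sent =>
        sent.foldl (fun raw (word : String) => raw.insert word (raw.getD word 0 + 1)) raw)
      PySem.Dict.empty
      = PySem.Dict.counter pt.flatten := by
  rw [← List.foldl_flatten, ← PySem.Dict.foldl_insert_getD_add_one_eq_counter]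

theorem getD_reshape (f : String → String) (P : List (String × Int))
    (d : PySem.Dict String Int) (k : String) :
    (P.foldl (fun frq p => frq.insert (f p.1) (frq.getD (f p.1) 0 + p.2)) d).getD k 0
      = d.getD k 0 + ((P.filter (fun p => f p.1 == k)).map (·.2)).sum := by
  induction P generalizing d with
  | nil => simp
  | cons p P ih =>
    simp only [List.foldl_cons, ih, List.filter_cons]
    by_cases h : f p.1 = k
    · simp [h]
      ring
    · simp [h, PySem.Dict.getD_insert, Ne.symm h]

theorem ofList_map_ofList {α β : Type} [DecidableEq α] [DecidableEq β]
    (f : α → β) (ws : List α) :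
    PySem.Set.ofList ((PySem.Set.ofList ws).map f) = PySem.Set.ofList (ws.map f) := by
  induction ws using List.reverseRecOn with
  | nil => rfl
  | append_singleton ws w ih =>
    rw [PySem.Set.ofList_append_singleton, List.map_append, List.map_singleton, PySem.Set.ofList_append_singleton]
    by_cases h : w ∈ PySem.Set.ofList ws
    · rw [PySem.Set.add_of_mem h, ih, PySem.Set.add_of_mem]
      rw [PySem.Set.mem_ofList]
      exact List.mem_map_of_mem ((PySem.Set.mem_ofList ws w).mp h)
    · rw [PySem.Set.add_of_not_mem h, List.map_append, List.map_singleton, PySem.Set.ofList_append_singleton, ih]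

theorem sum_indicator (a : String) (S : List String) (hnd : S.Nodup) :
    (S.map (fun x => if x = a then (1 : Int) else 0)).sum = if a ∈ S then (1 : Int) else 0 := by
  induction S with
  | nil => simp
  | cons b S ih =>
    simp only [List.map_cons, List.sum_cons, List.nodup_cons] at *
    rcases hnd with ⟨hb, hS⟩
    by_cases h : b = a
    · subst h
      simp [ih hS, hb]
    · simp [h, Ne.symm h, ih hS]

theorem sum_counts_gen (f : String → String) (k : String) (l S : List String)
    (hnd : S.Nodup) (hsub : ∀ x ∈ l, x ∈ S) :
    ((S.filter (fun x => f x == k)).map (fun x => (l.count x : Int))).sum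
      = ((l.map f).count k : Int) := by
  induction l with
  | nil => simp
  | cons a l ih =>
    have hsub' : ∀ x ∈ l, x ∈ S := fun x hx => hsub x (List.mem_cons_of_mem a hx)
    have hcnt : ∀ x : String, ((a :: l).count x : Int) = (l.count x : Int) + (if x = a then 1 else 0) := by
      intro x
      rcases eq_or_ne x a with h | h
      · subst h; simp
      · simp [h, Ne.symm h]
    calc ((S.filter (fun x => f x == k)).map (fun x => ((a :: l).count x : Int))).sum
        = ((S.filter (fun x => f x == k)).map
            (fun x => (l.count x : Int) + (if x = a then 1 else 0))).sum := by
          exact congrArg List.sum (List.map_congr_left (fun x _ => hcnt x))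
      _ = ((S.filter (fun x => f x == k)).map (fun x => (l.count x : Int))).sum
            + ((S.filter (fun x => f x == k)).map (fun x => if x = a then (1 : Int) else 0)).sum := by
          rw [← List.sum_map_add]
      _ = ((l.map f).count k : Int) + (if f a = k then 1 else 0) := by
          rw [ih hsub', sum_indicator a _ (hnd.filter _)]
          congr 1
          simp [List.mem_filter, hsub a (List.mem_cons_self)]
      _ = (((a :: l).map f).count k : Int) := by
          by_cases h : f a = k
          · simp [h, List.count_cons_self]
          · simp [h]

theorem sum_counts_fiber (f : String → String) (ws : List String) (k : String) :
    ((((PySem.Set.ofList ws).map (fun x => (x, (ws.count x : Int)))).filter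
        (fun p => f p.1 == k)).map (·.2)).sum
      = ((ws.map f).count k : Int) := by
  rw [List.filter_map, List.map_map]
  exact sum_counts_gen f k ws (PySem.Set.ofList ws) (PySem.Set.nodup_ofList ws)
    (fun x hx => (PySem.Set.mem_ofList ws x).mpr hx)

theorem reshape_counter (f : String → String) (ws : List String) :
    (PySem.Dict.counter ws).items.foldl
        (fun frq p => frq.insert (f p.1) (frq.getD (f p.1) 0 + p.2)) PySem.Dict.empty
      = PySem.Dict.counter (ws.map f) := by
  apply PySem.Dict.ext
  have hndL : ((PySem.Dict.counter ws).items.foldl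
      (fun frq p => frq.insert (f p.1) (frq.getD (f p.1) 0 + p.2)) PySem.Dict.empty).keys.Nodup := by
    refine PySem.Dict.nodup_keys_foldl_insert_key _ (fun p : String × Int => f p.1) _ _ ?_
    simp [PySem.Dict.keys_empty]
  have hkeys : ((PySem.Dict.counter ws).items.foldl
      (fun frq p => frq.insert (f p.1) (frq.getD (f p.1) 0 + p.2)) PySem.Dict.empty).keys
      = (PySem.Dict.counter (ws.map f)).keys := by
    rw [PySem.Dict.keys_foldl_insert_key, PySem.Dict.keys_counter, PySem.Dict.keys_empty,
      PySem.Set.update_nil_left, PySem.Dict.items_counter, List.map_map]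
    have : ((fun p : String × Int => f p.1) ∘ fun k => (k, (ws.count k : Int))) = f := rfl
    rw [this, ofList_map_ofList]
  rw [PySem.Dict.items_eq_map_keys _ hndL 0,
      PySem.Dict.items_eq_map_keys _ (PySem.Dict.nodup_keys_counter (ws.map f)) 0, hkeys]
  apply List.map_congr_left
  intro k _
  rw [getD_reshape f _ _ k, PySem.Dict.getD_empty, PySem.Dict.items_counter,
    sum_counts_fiber f ws k, PySem.Dict.getD_counter]
  exact Prod.ext rfl (zero_add _)

theorem portA_eq_counter (pt : List (List String)) (vocab : List String) :
    getUnigramFreqs pt vocab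
      = (PySem.Dict.counter ((pt.flatten).map
          (fun w => if PySem.Set.contains vocab w then w else "[UNK]"))).items := by
  exact portA_fold_eq_counter pt vocab

theorem portB_eq_counter (pt : List (List String)) (vocab : List String) :
    getUnigramFreqs_alt pt vocab
      = (PySem.Dict.counter ((pt.flatten).map
          (fun w => if PySem.Set.contains vocab w then w else "[UNK]"))).items := by
  simp only [getUnigramFreqs_alt, portB_raw]
  exact congrArg PySem.Dict.items
    (reshape_counter (fun w => if PySem.Set.contains vocab w then w else "[UNK]") pt.flatten)

-- ===== VERDICT (by name: the statement is the Claim_ definition above) =====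
theorem getUnigramFreqs_spec : Claim_equal_getUnigramFreqs := by
  intro pt vocab _
  unfold Spec_getUnigramFreqs
  rw [portA_eq_counter, portB_eq_counter]
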